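-- pv_equiv track=rewrite | github.com/alimsaleh1212-create/salary-predictor | src/preprocessing.py | _group_job_title
-- ===== SOURCE A (Python) =====
-- def _group_job_title(title: str) -> str:
--     t = str(title).lower()
--     if "data scientist" in t:
--         return "Data Scientist"
--     if "data engineer" in t or "big data" in t or "etl" in t:
--         return "Data Engineer"
--     if (
--         "data analyst" in t
--         or "bi data" in t
--         or "business data" in t
--         or "analytics" in t
--     ):
--         return "Data Analyst"
--     if any(x in t for x in ["machine learning", "ml engineer", "mle"]):
--         return "ML Engineer"
--     if any(x in t for x in ["director", "head", "principal", "lead"]):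
--         return "Lead/Director"
--     return "Other"
-- ===== SOURCE B (Python) =====
-- _KEYWORDS = [
--     ("data scientist", 0),
--     ("data engineer", 1), ("big data", 1), ("etl", 1),
--     ("data analyst", 2), ("bi data", 2), ("business data", 2), ("analytics", 2),
--     ("machine learning", 3), ("ml engineer", 3), ("mle", 3),
--     ("director", 4), ("head", 4), ("principal", 4), ("lead", 4),
-- ]
--
-- _LABELS = ["Data Scientist", "Data Engineer", "Data Analyst",
--            "ML Engineer", "Lead/Director", "Other"]
--
--
-- def _group_job_title(title: str) -> str:
--     t = str(title).lower()
--     best = 5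
--     for kw, i in _KEYWORDS:
--         if kw in t and i < best:
--             best = i
--     return _LABELS[best]
-- ===== Notes on version B (the rewrite author's own statement) =====
-- stated objective: alternative
-- what changed: Instead of a priority if-cascade with early return, B scans one flat keyword->rule-index table in full, keeps the minimum matching rule index in an accumulator, and indexes a label table at the end.
import Mathlib
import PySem

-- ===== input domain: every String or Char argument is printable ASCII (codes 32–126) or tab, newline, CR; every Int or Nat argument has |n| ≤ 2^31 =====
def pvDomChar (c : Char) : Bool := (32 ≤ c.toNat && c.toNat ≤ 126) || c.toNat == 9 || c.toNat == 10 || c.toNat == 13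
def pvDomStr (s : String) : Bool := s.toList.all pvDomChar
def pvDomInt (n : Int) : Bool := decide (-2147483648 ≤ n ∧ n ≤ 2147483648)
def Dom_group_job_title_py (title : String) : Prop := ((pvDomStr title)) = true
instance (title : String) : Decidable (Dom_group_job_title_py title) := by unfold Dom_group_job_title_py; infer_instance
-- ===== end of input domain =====

-- B replaces A's priority if-cascade (early return) by a full scan of a flat keyword->index table keeping the minimum matching rule index, then a label-table lookup (alternative decomposition, same cost).


-- ===== PORT A =====
def group_job_title_py (title : String) : String :=
  let t := PySem.Str.lower title
  if PySem.Str.isIn "data scientist" t then "Data Scientist"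
  else if PySem.Str.isIn "data engineer" t || PySem.Str.isIn "big data" t || PySem.Str.isIn "etl" t then "Data Engineer"
  else if PySem.Str.isIn "data analyst" t || PySem.Str.isIn "bi data" t || PySem.Str.isIn "business data" t || PySem.Str.isIn "analytics" t then "Data Analyst"
  else if (["machine learning", "ml engineer", "mle"] : List String).any (fun x => PySem.Str.isIn x t) then "ML Engineer"
  else if (["director", "head", "principal", "lead"] : List String).any (fun x => PySem.Str.isIn x t) then "Lead/Director"
  else "Other"

-- ===== PORT B =====
def pvKeywords : List (String × Nat) :=
  [("data scientist", 0),
   ("data engineer", 1), ("big data", 1), ("etl", 1),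
   ("data analyst", 2), ("bi data", 2), ("business data", 2), ("analytics", 2),
   ("machine learning", 3), ("ml engineer", 3), ("mle", 3),
   ("director", 4), ("head", 4), ("principal", 4), ("lead", 4)]

def pvLabels : List String :=
  ["Data Scientist", "Data Engineer", "Data Analyst", "ML Engineer", "Lead/Director", "Other"]

def group_job_title_py_alt (title : String) : String :=
  let t := PySem.Str.lower title
  let best := pvKeywords.foldl
    (fun best p => if PySem.Str.isIn p.1 t && decide (p.2 < best) then p.2 else best) 5
  pvLabels.getD best "Other"

-- ===== PRECONDITION & SPEC =====
def Spec_group_job_title_py (title : String) (out : String) : Prop := out = group_job_title_py_alt title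
instance (title : String) (out : String) : Decidable (Spec_group_job_title_py title out) := by unfold Spec_group_job_title_py; infer_instance

-- ===== CLAIM (what is proved, stated in full; the proofs are below) =====
def Claim_equal_group_job_title_py : Prop := ∀ (title : String), Dom_group_job_title_py title → Spec_group_job_title_py title (group_job_title_py title)

-- ===== LEMMAS AND PROOFS =====
-- If every index in the list is ≥ best, the min-index fold leaves best unchanged.
theorem pv_fold_const (t : String) (l : List (String × Nat)) (best : Nat)
    (h : ∀ p ∈ l, best ≤ p.2) :
    List.foldl (fun best p => if PySem.Str.isIn p.1 t && decide (p.2 < best) then p.2 else best)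
      best l = best := by
  induction l with
  | nil => rfl
  | cons p rest ih =>
      have hp : ¬ p.2 < best := Nat.not_lt.2 (h p (List.mem_cons_self))
      simp only [List.foldl_cons, hp, decide_false, Bool.and_false]
      exact ih (fun q hq => h q (List.mem_cons_of_mem _ hq))

-- With indices nondecreasing and all below best, the fold returns the first matching index.
theorem pv_fold_find (t : String) (l : List (String × Nat)) (best : Nat)
    (hs : l.Pairwise (fun a b => a.2 ≤ b.2)) (hlt : ∀ p ∈ l, p.2 < best) :
    List.foldl (fun best p => if PySem.Str.isIn p.1 t && decide (p.2 < best) then p.2 else best)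
      best l
    = ((l.find? (fun p => PySem.Str.isIn p.1 t)).map Prod.snd).getD best := by
  induction l generalizing best with
  | nil => rfl
  | cons p rest ih =>
      rcases List.pairwise_cons.1 hs with ⟨hhead, htail⟩
      by_cases hm : PySem.Str.isIn p.1 t = true
      · have hp : p.2 < best := hlt p (List.mem_cons_self)
        simp only [List.foldl_cons, hm, hp, decide_true, Bool.true_and, if_true, List.find?]
        rw [pv_fold_const t rest p.2 (fun q hq => hhead q hq)]
        simp
      · have hm' : PySem.Str.isIn p.1 t = false := by
          revert hm; cases PySem.Str.isIn p.1 t <;> simp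
        simp only [List.foldl_cons, hm', Bool.false_and, List.find?]
        rw [if_neg Bool.false_ne_true,
          ih best htail (fun q hq => hlt q (List.mem_cons_of_mem _ hq))]

-- ===== VERDICT (by name: the statement is the Claim_ definition above) =====
theorem group_job_title_py_spec : Claim_equal_group_job_title_py := by
  intro title _
  unfold Spec_group_job_title_py group_job_title_py group_job_title_py_alt pvKeywords pvLabels
  dsimp only
  rw [pv_fold_find _ _ _ (by decide) (by decide)]
  simp only [List.find?, List.any]
  generalize PySem.Str.lower title = tl
  by_cases h1 : PySem.Chars.isIn ['d', 'a', 't', 'a', ' ', 's', 'c', 'i', 'e', 'n', 't', 'i', 's', 't'] tl.toList = true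
  · simp [PySem.Str.isIn, h1]
  rw [Bool.not_eq_true] at h1
  by_cases h2 : PySem.Chars.isIn ['d', 'a', 't', 'a', ' ', 'e', 'n', 'g', 'i', 'n', 'e', 'e', 'r'] tl.toList = true
  · simp [PySem.Str.isIn, h1, h2]
  rw [Bool.not_eq_true] at h2
  by_cases h3 : PySem.Chars.isIn ['b', 'i', 'g', ' ', 'd', 'a', 't', 'a'] tl.toList = true
  · simp [PySem.Str.isIn, h1, h2, h3]
  rw [Bool.not_eq_true] at h3
  by_cases h4 : PySem.Chars.isIn ['e', 't', 'l'] tl.toList = true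
  · simp [PySem.Str.isIn, h1, h2, h3, h4]
  rw [Bool.not_eq_true] at h4
  by_cases h5 : PySem.Chars.isIn ['d', 'a', 't', 'a', ' ', 'a', 'n', 'a', 'l', 'y', 's', 't'] tl.toList = true
  · simp [PySem.Str.isIn, h1, h2, h3, h4, h5]
  rw [Bool.not_eq_true] at h5
  by_cases h6 : PySem.Chars.isIn ['b', 'i', ' ', 'd', 'a', 't', 'a'] tl.toList = true
  · simp [PySem.Str.isIn, h1, h2, h3, h4, h5, h6]
  rw [Bool.not_eq_true] at h6
  by_cases h7 : PySem.Chars.isIn ['b', 'u', 's', 'i', 'n', 'e', 's', 's', ' ', 'd', 'a', 't', 'a'] tl.toList = true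
  · simp [PySem.Str.isIn, h1, h2, h3, h4, h5, h6, h7]
  rw [Bool.not_eq_true] at h7
  by_cases h8 : PySem.Chars.isIn ['a', 'n', 'a', 'l', 'y', 't', 'i', 'c', 's'] tl.toList = true
  · simp [PySem.Str.isIn, h1, h2, h3, h4, h5, h6, h7, h8]
  rw [Bool.not_eq_true] at h8
  by_cases h9 : PySem.Chars.isIn ['m', 'a', 'c', 'h', 'i', 'n', 'e', ' ', 'l', 'e', 'a', 'r', 'n', 'i', 'n', 'g'] tl.toList = true
  · simp [PySem.Str.isIn, h1, h2, h3, h4, h5, h6, h7, h8, h9]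
  rw [Bool.not_eq_true] at h9
  by_cases h10 : PySem.Chars.isIn ['m', 'l', ' ', 'e', 'n', 'g', 'i', 'n', 'e', 'e', 'r'] tl.toList = true
  · simp [PySem.Str.isIn, h1, h2, h3, h4, h5, h6, h7, h8, h9, h10]
  rw [Bool.not_eq_true] at h10
  by_cases h11 : PySem.Chars.isIn ['m', 'l', 'e'] tl.toList = true
  · simp [PySem.Str.isIn, h1, h2, h3, h4, h5, h6, h7, h8, h9, h10, h11]
  rw [Bool.not_eq_true] at h11
  by_cases h12 : PySem.Chars.isIn ['d', 'i', 'r', 'e', 'c', 't', 'o', 'r'] tl.toList = true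
  · simp [PySem.Str.isIn, h1, h2, h3, h4, h5, h6, h7, h8, h9, h10, h11, h12]
  rw [Bool.not_eq_true] at h12
  by_cases h13 : PySem.Chars.isIn ['h', 'e', 'a', 'd'] tl.toList = true
  · simp [PySem.Str.isIn, h1, h2, h3, h4, h5, h6, h7, h8, h9, h10, h11, h12, h13]
  rw [Bool.not_eq_true] at h13
  by_cases h14 : PySem.Chars.isIn ['p', 'r', 'i', 'n', 'c', 'i', 'p', 'a', 'l'] tl.toList = true
  · simp [PySem.Str.isIn, h1, h2, h3, h4, h5, h6, h7, h8, h9, h10, h11, h12, h13, h14]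
  rw [Bool.not_eq_true] at h14
  by_cases h15 : PySem.Chars.isIn ['l', 'e', 'a', 'd'] tl.toList = true
  · simp [PySem.Str.isIn, h1, h2, h3, h4, h5, h6, h7, h8, h9, h10, h11, h12, h13, h14, h15]
  rw [Bool.not_eq_true] at h15
  simp [PySem.Str.isIn, h1, h2, h3, h4, h5, h6, h7, h8, h9, h10, h11, h12, h13, h14, h15]
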